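-- pv_equiv track=rewrite | github.com/matjussu/OrientIA | scripts/run_bench_agent_pipeline_apples.py | _select_balanced_subset
-- ===== SOURCE A (Python) =====
-- def _select_balanced_subset(all_queries: list) -> list:
--     """Sélectionne 24 queries balanced (6 par sous-suite)."""
--     by_suite = {}
--     for q in all_queries:
--         s = q["suite"]
--         by_suite.setdefault(s, []).append(q)
--
--     # 6 personas v4 : un par persona (q1) — couvre 6 personas distincts
--     personas_subset = [q for q in by_suite.get("personas_v4", [])
--                        if q["id"].endswith("_q1")][:6]
--
--     # 6 DARES : q01-q06
--     dares_subset = by_suite.get("dares_dedie", [])[:6]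
--     blocs_subset = by_suite.get("blocs_dedie", [])[:6]
--     user_subset = by_suite.get("user_naturel", [])[:6]
--
--     return personas_subset + dares_subset + blocs_subset + user_subset
-- ===== SOURCE B (Python) =====
-- def _select_balanced_subset(all_queries: list) -> list:
--     """Sélectionne 24 queries balanced (6 par sous-suite)."""
--     personas = [q for q in all_queries
--                 if q["suite"] == "personas_v4" and q["id"].endswith("_q1")][:6]
--     dares = [q for q in all_queries if q["suite"] == "dares_dedie"][:6]
--     blocs = [q for q in all_queries if q["suite"] == "blocs_dedie"][:6]
--     user = [q for q in all_queries if q["suite"] == "user_naturel"][:6]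
--     return personas + dares + blocs + user
-- ===== Notes on version B (the rewrite author's own statement) =====
-- stated objective: simpler
-- what changed: Drops the by_suite grouping dict entirely: each of the four subsets is built by a direct filtered scan of all_queries (filter preserves order, so the first-six slices coincide), instead of folding all queries into a dict of per-suite lists and slicing its entries.
import Mathlib
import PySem

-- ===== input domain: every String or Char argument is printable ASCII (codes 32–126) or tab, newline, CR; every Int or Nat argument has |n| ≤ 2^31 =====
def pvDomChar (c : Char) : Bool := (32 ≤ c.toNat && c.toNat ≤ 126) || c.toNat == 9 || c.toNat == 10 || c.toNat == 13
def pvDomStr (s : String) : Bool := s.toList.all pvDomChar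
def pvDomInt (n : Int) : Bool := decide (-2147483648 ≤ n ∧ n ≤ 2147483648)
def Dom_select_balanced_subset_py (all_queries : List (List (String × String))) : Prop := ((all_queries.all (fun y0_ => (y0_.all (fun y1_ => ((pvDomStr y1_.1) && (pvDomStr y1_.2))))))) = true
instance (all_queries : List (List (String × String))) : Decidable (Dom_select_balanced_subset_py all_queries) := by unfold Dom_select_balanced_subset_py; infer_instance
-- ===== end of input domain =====

-- B replaces A's by_suite grouping dict with four direct filtered scans of all_queries (simpler; same order, same first-six slices).


-- shared helper: q[k] for a query dict q, total form (Pre_ guarantees the key is present where Python reads it)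
def qget (q : List (String × String)) (k : String) : String :=
  (PySem.Dict.mk q).getD k ""

-- ===== PORT A =====
def select_balanced_subset_py (all_queries : List (List (String × String))) : List (List (String × String)) :=
  -- by_suite = {}; for q in all_queries: by_suite.setdefault(q["suite"], []).append(q)
  let by_suite : PySem.Dict String (List (List (String × String))) :=
    all_queries.foldl (fun d q => d.modify (qget q "suite") [] (· ++ [q])) PySem.Dict.empty
  let personas_subset :=
    ((by_suite.getD "personas_v4" []).filter
      (fun q => PySem.Str.endswith (qget q "id") "_q1")).take 6
  let dares_subset := (by_suite.getD "dares_dedie" []).take 6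
  let blocs_subset := (by_suite.getD "blocs_dedie" []).take 6
  let user_subset := (by_suite.getD "user_naturel" []).take 6
  personas_subset ++ dares_subset ++ blocs_subset ++ user_subset

-- ===== PORT B =====
def select_balanced_subset_py_alt (all_queries : List (List (String × String))) : List (List (String × String)) :=
  let personas :=
    (all_queries.filter
      (fun q => qget q "suite" == "personas_v4" && PySem.Str.endswith (qget q "id") "_q1")).take 6
  let dares := (all_queries.filter (fun q => qget q "suite" == "dares_dedie")).take 6
  let blocs := (all_queries.filter (fun q => qget q "suite" == "blocs_dedie")).take 6
  let user := (all_queries.filter (fun q => qget q "suite" == "user_naturel")).take 6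
  personas ++ dares ++ blocs ++ user

-- ===== PRECONDITION & SPEC =====
-- Pre_ excludes exactly the inputs on which Python A raises KeyError: a query without a
-- "suite" key, or a personas_v4 query without an "id" key (B raises there too).
def Pre_select_balanced_subset_py (all_queries : List (List (String × String))) : Prop :=
  ∀ q ∈ all_queries,
    ((PySem.Dict.mk q).get? "suite").isSome = true ∧
    ((PySem.Dict.mk q).get? "suite" = some "personas_v4" → ((PySem.Dict.mk q).get? "id").isSome = true)
instance (all_queries : List (List (String × String))) : Decidable (Pre_select_balanced_subset_py all_queries) := by unfold Pre_select_balanced_subset_py; infer_instance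

def pvWitness_select_balanced_subset_py : (List (List (String × String))) :=
  [[("suite", "personas_v4"), ("id", "p1_q1")], [("suite", "dares_dedie"), ("id", "d01")]]

def Spec_select_balanced_subset_py (all_queries : List (List (String × String))) (out : List (List (String × String))) : Prop := out = select_balanced_subset_py_alt all_queries
instance (all_queries : List (List (String × String))) (out : List (List (String × String))) : Decidable (Spec_select_balanced_subset_py all_queries out) := by unfold Spec_select_balanced_subset_py; infer_instance

-- ===== CLAIM (what is proved, stated in full; the proofs are below) =====
def Claim_equal_select_balanced_subset_py : Prop := ∀ (all_queries : List (List (String × String))), Dom_select_balanced_subset_py all_queries → Pre_select_balanced_subset_py all_queries → Spec_select_balanced_subset_py all_queries (select_balanced_subset_py all_queries)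

-- ===== LEMMAS AND PROOFS =====

-- A's grouping dict read back at key c is exactly the order-preserving filter of all_queries.
theorem by_suite_getD (all_queries : List (List (String × String))) (c : String) :
    (all_queries.foldl (fun d q => d.modify (qget q "suite") [] (· ++ [q]))
        (PySem.Dict.empty : PySem.Dict String (List (List (String × String))))).getD c []
      = all_queries.filter (fun q => qget q "suite" == c) := by
  have h := PySem.Dict.getD_foldl_modify_append
    (l := all_queries.map (fun q => (qget q "suite", q)))
    (d := (PySem.Dict.empty : PySem.Dict String (List (List (String × String))))) (c := c)
  rw [List.foldl_map] at h
  simp only [h, PySem.Dict.getD_empty, List.nil_append, List.filter_map]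
  rw [List.map_map]
  simp [Function.comp_def]

theorem select_balanced_subset_py_eq_alt (all_queries : List (List (String × String))) :
    select_balanced_subset_py all_queries = select_balanced_subset_py_alt all_queries := by
  simp only [select_balanced_subset_py, select_balanced_subset_py_alt, by_suite_getD,
    List.filter_filter]
  rw [List.filter_congr (fun a _ => Bool.and_comm _ _)]

-- ===== VERDICT (by name: the statement is the Claim_ definition above) =====
theorem select_balanced_subset_py_spec : Claim_equal_select_balanced_subset_py := by
  intro all_queries _ _
  exact select_balanced_subset_py_eq_alt all_queries
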